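-- pv_equiv track=rewrite | github.com/chengshaozhe/commitmentObstacles | dataAnalysis/analysisRT.py | calculateIsTimeMaxNextNoisePoint
-- ===== SOURCE A (Python) =====
-- def calculateIsTimeMaxNextNoisePoint(timeList, noisePoint):
--     noisePointNextStep = [i + 1 for i in noisePoint]
--     timeGap = [timeList[i + 1] - timeList[i] for i in range(len(timeList) - 1)]
--     maxReactTimeStep = [i + 2 for i, x in enumerate(timeGap) if x == max(timeGap)]
--     if [i for i in maxReactTimeStep if i in noisePointNextStep] != []:
--         isTimeMaxNextNoisePoint = 1
--     else:
--         isTimeMaxNextNoisePoint = 0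
--     return isTimeMaxNextNoisePoint
-- ===== SOURCE B (Python) =====
-- def calculateIsTimeMaxNextNoisePoint(timeList, noisePoint):
--     noiseSet = set(noisePoint)
--     maxGap = None
--     hit = False
--     for idx in range(1, len(timeList)):
--         gap = timeList[idx] - timeList[idx - 1]
--         if maxGap is None or gap > maxGap:
--             maxGap = gap
--             hit = idx in noiseSet
--         elif gap == maxGap:
--             hit = hit or (idx in noiseSet)
--     return 1 if hit else 0
-- ===== Notes on version B (the rewrite author's own statement) =====
-- stated objective: faster
-- what changed: B never materializes the gap list, the max-position list or the noise+1 list: one left-to-right pass over consecutive pairs maintains the running maximum gap and a boolean hit flag (reset on a strictly larger gap, or-ed with noise-set membership on a tie), against a noise set built once.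
import Mathlib
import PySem

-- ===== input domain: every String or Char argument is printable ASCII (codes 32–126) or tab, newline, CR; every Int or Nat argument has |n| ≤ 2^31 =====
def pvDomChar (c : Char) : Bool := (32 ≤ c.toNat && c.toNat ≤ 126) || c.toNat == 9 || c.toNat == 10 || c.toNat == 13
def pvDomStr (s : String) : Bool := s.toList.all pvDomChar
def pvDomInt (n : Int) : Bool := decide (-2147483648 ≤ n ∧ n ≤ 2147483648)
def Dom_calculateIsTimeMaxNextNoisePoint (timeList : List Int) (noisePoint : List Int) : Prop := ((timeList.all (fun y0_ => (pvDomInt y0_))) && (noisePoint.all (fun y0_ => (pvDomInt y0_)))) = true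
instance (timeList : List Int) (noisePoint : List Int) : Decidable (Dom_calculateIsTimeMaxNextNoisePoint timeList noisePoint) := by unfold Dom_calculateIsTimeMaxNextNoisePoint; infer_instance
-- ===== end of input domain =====

-- B replaces A's staged lists (gap list, per-gap max re-evaluation, max-position list, noise+1
-- list, intersection) by one running-max pass with a tie-tracked hit flag (objective: faster).

-- ===== PORT A =====
def calculateIsTimeMaxNextNoisePoint (timeList : List Int) (noisePoint : List Int) : Int :=
  let noisePointNextStep := noisePoint.map (fun i => i + 1)
  let timeGap := (PySem.List.pyRange 0 ((timeList.length : Int) - 1) 1).map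
    (fun i => PySem.List.pyGetD timeList (i + 1) 0 - PySem.List.pyGetD timeList i 0)
  -- max(timeGap) is only evaluated inside the comprehension, so an empty timeGap never raises
  let maxReactTimeStep := ((PySem.List.enumerate timeGap 0).filter
      (fun p => p.2 == (PySem.List.max? timeGap (fun y => y)).getD 0)).map (fun p => p.1 + 2)
  if maxReactTimeStep.filter (fun i => noisePointNextStep.contains i) ≠ [] then 1 else 0

-- ===== PORT B =====
-- one loop iteration: state is (maxGap : Option Int = None initially, hit : Bool)
def pvBStep (timeList : List Int) (noiseSet : PySem.Set Int) (st : Option Int × Bool) (idx : Int) :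
    Option Int × Bool :=
  let gap := PySem.List.pyGetD timeList idx 0 - PySem.List.pyGetD timeList (idx - 1) 0
  match st with
  | (none, _) => (some gap, noiseSet.contains idx)
  | (some m, hit) =>
      if gap > m then (some gap, noiseSet.contains idx)
      else if gap = m then (some m, hit || noiseSet.contains idx)
      else (some m, hit)

def calculateIsTimeMaxNextNoisePoint_alt (timeList : List Int) (noisePoint : List Int) : Int :=
  let noiseSet := PySem.Set.ofList noisePoint
  let st := (PySem.List.pyRange 1 (timeList.length : Int) 1).foldl
    (pvBStep timeList noiseSet) (none, false)
  if st.2 then 1 else 0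

-- ===== PRECONDITION & SPEC =====
def Spec_calculateIsTimeMaxNextNoisePoint (timeList : List Int) (noisePoint : List Int) (out : Int) : Prop := out = calculateIsTimeMaxNextNoisePoint_alt timeList noisePoint
instance (timeList : List Int) (noisePoint : List Int) (out : Int) : Decidable (Spec_calculateIsTimeMaxNextNoisePoint timeList noisePoint out) := by unfold Spec_calculateIsTimeMaxNextNoisePoint; infer_instance

-- ===== CLAIM (what is proved, stated in full; the proofs are below) =====
def Claim_equal_calculateIsTimeMaxNextNoisePoint : Prop := ∀ (timeList : List Int) (noisePoint : List Int), Dom_calculateIsTimeMaxNextNoisePoint timeList noisePoint → Spec_calculateIsTimeMaxNextNoisePoint timeList noisePoint (calculateIsTimeMaxNextNoisePoint timeList noisePoint)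

-- ===== LEMMAS AND PROOFS =====

-- the gap entering step idx (B's per-iteration value)
def pvGap (timeList : List Int) (idx : Int) : Int :=
  PySem.List.pyGetD timeList idx 0 - PySem.List.pyGetD timeList (idx - 1) 0

-- unfolding equations for B's loop step
theorem pvBStep_none (t : List Int) (ns : PySem.Set Int) (h : Bool) (i : Int) :
    pvBStep t ns (none, h) i = (some (pvGap t i), ns.contains i) := rfl

theorem pvBStep_some (t : List Int) (ns : PySem.Set Int) (m : Int) (h : Bool) (i : Int) :
    pvBStep t ns (some m, h) i =
      if pvGap t i > m then (some (pvGap t i), ns.contains i)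
      else if pvGap t i = m then (some m, h || ns.contains i)
      else (some m, h) := rfl

-- B's loop from a (some m, h) state: first component is the running max; hit ⟺ the old hit
-- survives (m is still the max) or some index in the remainder achieves the final max and is noise
theorem pvBStep_foldl_char (t : List Int) (ns : PySem.Set Int) (L : List Int) :
    ∀ (m : Int) (h : Bool),
    L.foldl (pvBStep t ns) (some m, h) =
      (some (L.foldl (fun acc i => max acc (pvGap t i)) m),
       ((h && (m == L.foldl (fun acc i => max acc (pvGap t i)) m)) ||
        L.any (fun i => ns.contains i &&
          (pvGap t i == L.foldl (fun acc j => max acc (pvGap t j)) m)))) := by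
  induction L with
  | nil => intro m h; simp
  | cons i L ih =>
      intro m h
      have hle : ∀ (m' : Int), m' ≤ L.foldl (fun acc j => max acc (pvGap t j)) m' := by
        intro m'
        have := (PySem.List.le_foldl_max (L.map (pvGap t)) m').1
        simpa [List.foldl_map] using this
      simp only [List.foldl_cons, List.any_cons, pvBStep_some]
      by_cases hgt : pvGap t i > m
      · rw [if_pos hgt, ih]
        have hmax : max m (pvGap t i) = pvGap t i := by omega
        rw [hmax]
        have hne : (m == L.foldl (fun acc j => max acc (pvGap t j)) (pvGap t i)) = false := by
          have := hle (pvGap t i)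
          simp only [beq_eq_false_iff_ne, ne_eq]; omega
        rw [hne]
        simp
      · by_cases heq : pvGap t i = m
        · rw [if_neg hgt, if_pos heq, ih]
          have hmax : max m (pvGap t i) = m := by omega
          rw [hmax, heq]
          congr 1
          cases (m == L.foldl (fun acc j => max acc (pvGap t j)) m) with
          | false => simp
          | true => cases h <;> cases ns.contains i <;> simp
        · rw [if_neg hgt, if_neg heq, ih]
          have hmax : max m (pvGap t i) = m := by omega
          rw [hmax]
          have hg : (pvGap t i == L.foldl (fun acc j => max acc (pvGap t j)) m) = false := by
            have := hle m
            simp only [beq_eq_false_iff_ne, ne_eq]; omega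
          rw [hg]
          simp

-- the two membership conditions coincide (A's enumerate/filter view vs an indexed view)
theorem pv_cond_iff (g : List Int) (m : Int) (np : List Int) :
    (∃ i ∈ ((PySem.List.enumerate g 0).filter (fun p => p.2 == m)).map (fun p => p.1 + 2),
        i ∈ np.map (fun i => i + 1)) ↔
    (∃ p ∈ np, 1 ≤ p ∧ p ≤ (g.length : Int) ∧ PySem.List.pyGetD g (p - 1) 0 = m) := by
  constructor
  · rintro ⟨i, hi, hmem⟩
    simp only [List.mem_map, List.mem_filter, PySem.List.mem_enumerate_iff] at hi hmem
    obtain ⟨⟨k', v⟩, ⟨⟨k, hk, hpair⟩, hv⟩, hi2⟩ := hi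
    obtain ⟨p, hp, hpi⟩ := hmem
    cases hpair
    refine ⟨p, hp, by omega, by omega, ?_⟩
    have hx : p - 1 = (k : Int) := by omega
    rw [hx, PySem.List.pyGetD_natCast]
    simp only [beq_iff_eq] at hv
    simp [List.getD, List.getElem?_eq_getElem hk, hv]
  · rintro ⟨p, hp, h1, h2, h3⟩
    set k : Nat := (p - 1).toNat with hk
    have hkg : k < g.length := by omega
    have hget : PySem.List.pyGetD g (p - 1) 0 = g[k] := by
      have : p - 1 = (k : Int) := by omega
      rw [this]
      simp [PySem.List.pyGetD_natCast, List.getD, hkg]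
    refine ⟨(k : Int) + 2, ?_, ?_⟩
    · simp only [List.mem_map, List.mem_filter, PySem.List.mem_enumerate_iff]
      exact ⟨((k : Int), g[k]), ⟨⟨k, hkg, by simp⟩, by simp [← hget, h3]⟩, rfl⟩
    · simp only [List.mem_map]
      exact ⟨p, hp, by omega⟩

-- when len(timeList) < 2 the gap list is empty, so A returns 0
theorem pv_short (timeList noisePoint : List Int) (h : timeList.length < 2) :
    calculateIsTimeMaxNextNoisePoint timeList noisePoint = 0 := by
  have hnil : PySem.List.pyRange 0 ((timeList.length : Int) - 1) 1 = [] :=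
    PySem.List.pyRange_one_eq_nil (by omega)
  simp [calculateIsTimeMaxNextNoisePoint, hnil, PySem.List.enumerate_nil]

-- A's gap list is B's per-step gaps over range(1, n)
theorem pv_gap_lists (t : List Int) :
    (PySem.List.pyRange 0 ((t.length : Int) - 1) 1).map
      (fun i => PySem.List.pyGetD t (i + 1) 0 - PySem.List.pyGetD t i 0) =
    (PySem.List.pyRange 1 (t.length : Int) 1).map (pvGap t) := by
  rw [PySem.List.pyRange_one, PySem.List.pyRange_one]
  have hlen : ((t.length : Int) - 1 - 0).toNat = ((t.length : Int) - 1).toNat := by omega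
  rw [hlen, List.map_map, List.map_map]
  apply List.map_congr_left
  intro k _
  simp [pvGap]
  ring_nf

-- set membership in B's noise set is list membership
theorem pv_contains_iff (np : List Int) (x : Int) :
    ((PySem.Set.ofList np).contains x = true) ↔ x ∈ np := by
  simp [PySem.Set.mem_ofList]

-- ===== VERDICT (by name: the statement is the Claim_ definition above) =====
theorem calculateIsTimeMaxNextNoisePoint_spec : Claim_equal_calculateIsTimeMaxNextNoisePoint := by
  intro timeList noisePoint _
  unfold Spec_calculateIsTimeMaxNextNoisePoint
  by_cases hlen : timeList.length < 2
  · rw [pv_short timeList noisePoint hlen]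
    have hnil : PySem.List.pyRange 1 (timeList.length : Int) 1 = [] :=
      PySem.List.pyRange_one_eq_nil (by omega)
    simp [calculateIsTimeMaxNextNoisePoint_alt, hnil]
  · -- n ≥ 2: range(1, n) is nonempty
    have hcons : PySem.List.pyRange 1 (timeList.length : Int) 1 =
        1 :: PySem.List.pyRange 2 (timeList.length : Int) 1 := by
      have := PySem.List.pyRange_one_cons (a := 1) (b := (timeList.length : Int)) (by omega)
      simpa using this
    unfold calculateIsTimeMaxNextNoisePoint calculateIsTimeMaxNextNoisePoint_alt
    set t := timeList
    set ns := PySem.Set.ofList noisePoint with hns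
    set R := PySem.List.pyRange 2 (t.length : Int) 1 with hR
    set g := (PySem.List.pyRange 0 ((t.length : Int) - 1) 1).map
      (fun i => PySem.List.pyGetD t (i + 1) 0 - PySem.List.pyGetD t i 0) with hg
    have hglist : g = (PySem.List.pyRange 1 (t.length : Int) 1).map (pvGap t) := pv_gap_lists t
    have hgcons : g = pvGap t 1 :: R.map (pvGap t) := by rw [hglist, hcons]; simp
    -- the shared final maximum
    set M := R.foldl (fun acc j => max acc (pvGap t j)) (pvGap t 1) with hM
    have hmaxA : (PySem.List.max? g (fun y => y)).getD 0 = M := by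
      rw [hgcons, PySem.List.max?_id_cons]
      simp [List.foldl_map, hM]
    -- evaluate B's fold
    have hfold : (PySem.List.pyRange 1 (t.length : Int) 1).foldl
        (pvBStep t ns) (none, false) =
        (some M, (ns.contains 1 && (pvGap t 1 == M)) ||
          R.any (fun i => ns.contains i && (pvGap t i == M))) := by
      rw [hcons, List.foldl_cons, pvBStep_none, pvBStep_foldl_char]
    simp only [hfold, hmaxA]
    -- both sides are 'if <condition> then 1 else 0'; show the conditions agree
    have hA : (((PySem.List.enumerate g 0).filter (fun p => p.2 == M)).map (fun p => p.1 + 2)).filter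
        (fun i => (noisePoint.map (fun i => i + 1)).contains i) ≠ [] ↔
        ∃ i ∈ ((PySem.List.enumerate g 0).filter (fun p => p.2 == M)).map (fun p => p.1 + 2),
          i ∈ noisePoint.map (fun i => i + 1) := by
      rw [← List.isEmpty_eq_false_iff, List.isEmpty_eq_false_iff_exists_mem]
      simp [List.mem_filter]
    have hglen : (g.length : Int) = (t.length : Int) - 1 := by
      rw [hglist]; simp [PySem.List.length_pyRange_one]; omega
    have hgetg : ∀ (p : Int), 1 ≤ p → p ≤ (g.length : Int) →
        PySem.List.pyGetD g (p - 1) 0 = pvGap t p := by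
      intro p hp1 hp2
      rw [hglist]
      have := PySem.List.pyGetD_map_pyRange_one (f := pvGap t) (a := 1)
        (b := (t.length : Int)) (k := (p - 1).toNat) (d := 0) (by omega)
      have hcast : ((p - 1).toNat : Int) = p - 1 := by omega
      rw [hcast] at this
      rw [this]
      congr 1; omega
    have hBcond : ((ns.contains 1 && (pvGap t 1 == M)) ||
          R.any (fun i => ns.contains i && (pvGap t i == M))) = true ↔
        ∃ p ∈ noisePoint, 1 ≤ p ∧ p ≤ (g.length : Int) ∧ PySem.List.pyGetD g (p - 1) 0 = M := by
      constructor
      · intro hc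
        rcases Bool.or_eq_true_iff.mp hc with h1 | h2
        · rcases Bool.and_eq_true_iff.mp h1 with ⟨hc1, hc2⟩
          refine ⟨1, (pv_contains_iff noisePoint 1).mp hc1, by omega, by omega, ?_⟩
          rw [hgetg 1 (by omega) (by omega)]
          simpa using hc2
        · rcases List.any_eq_true.mp h2 with ⟨i, hiR, hi⟩
          rcases Bool.and_eq_true_iff.mp hi with ⟨hc1, hc2⟩
          have hiB : 2 ≤ i ∧ i < (t.length : Int) := by
            have := (PySem.List.mem_pyRange_one (a := 2) (b := (t.length : Int)) (x := i)).mp (hR ▸ hiR)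
            omega
          refine ⟨i, (pv_contains_iff noisePoint i).mp hc1, by omega, by omega, ?_⟩
          rw [hgetg i (by omega) (by omega)]
          simpa using hc2
      · rintro ⟨p, hp, h1, h2, h3⟩
        rw [hgetg p h1 h2] at h3
        have hcp : ns.contains p = true := (pv_contains_iff noisePoint p).mpr hp
        by_cases hp1 : p = 1
        · apply Bool.or_eq_true_iff.mpr; left
          subst hp1
          rw [hcp, h3]; simp
        · apply Bool.or_eq_true_iff.mpr; right
          apply List.any_eq_true.mpr
          refine ⟨p, ?_, by rw [hcp, h3]; simp⟩
          rw [hR]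
          exact (PySem.List.mem_pyRange_one).mpr (by omega)
    by_cases hc : ((ns.contains 1 && (pvGap t 1 == M)) ||
          R.any (fun i => ns.contains i && (pvGap t i == M))) = true
    · rw [if_pos (hA.mpr ((pv_cond_iff g M noisePoint).mpr (hBcond.mp hc))), if_pos hc]
    · have h1 : ¬ _ := fun h => hc (hBcond.mpr ((pv_cond_iff g M noisePoint).mp (hA.mp h)))
      rw [if_neg h1, if_neg hc]
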